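-- pv_equiv track=rewrite | github.com/potocnikales/advent-of-code | day9.py | _calculate_contiguous
-- ===== SOURCE A (Python) =====
-- import itertools
--
-- def _calculate(arr, step):
--     _index = step
--     for i in arr[step:]:
--         _is_ok = False
--         _comb_arr = [int(item) for item in arr[_index-step:_index]]
--         for numbers in itertools.combinations(_comb_arr, 2):
--             if sum(numbers) == int(i):
--                _is_ok = True
--         if _is_ok:
--             _index += 1
--         else:
--             return i
--     return 0
--
-- def _search_contiguous(arr, target_sum, r):
--     _contiguous_list = [0]
--     n = len(arr)
--     start = 0
--     curr_sum = arr[0]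
--     index = 1
--     i = 1
--     while i <= n:
--         if curr_sum == target_sum and index == r:
--             _contiguous_list = arr[i-r:i]
--         while index >= r:
--             curr_sum -= arr[start]
--             start += 1
--             index = r-1
--         if i < n:
--             curr_sum += arr[i]
--             index += 1
--         i += 1
--
--     return min(_contiguous_list) + max(_contiguous_list)
--
-- def _calculate_contiguous(arr, step):
--     _target = _calculate(arr, step)
--     _int_arr = [int(element) for element in arr]
--     for i in range(2,50):
--         _result = _search_contiguous(_int_arr, int(_target), i)
--         if _result > 0:
--             return _result
--     return 0
-- ===== SOURCE B (Python) =====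
-- def _calculate_contiguous(arr, step):
--     nums = [int(e) for e in arr]
--     # find the first number that is not a sum of two of the preceding
--     # `step` values: seen-set two-sum scan instead of all combinations
--     target = 0
--     idx = step
--     for v in nums[step:]:
--         window = nums[idx - step:idx]
--         seen = set()
--         ok = False
--         for x in window:
--             if v - x in seen:
--                 ok = True
--                 break
--             seen.add(x)
--         if not ok:
--             target = v
--             break
--         idx += 1
--     # contiguous search: prefix sums, last window of each length r
--     n = len(nums)
--     prefix = [0]
--     for x in nums:
--         prefix.append(prefix[-1] + x)
--     for r in range(2, 50):
--         best = None
--         for j in range(0, n - r + 1):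
--             if prefix[j + r] - prefix[j] == target:
--                 best = j
--         if best is not None:
--             w = nums[best:best + r]
--             res = min(w) + max(w)
--             if res > 0:
--                 return res
--     return 0
-- ===== Notes on version B (the rewrite author's own statement) =====
-- stated objective: faster
-- what changed: the per-element itertools.combinations pair scan is replaced by a seen-set two-sum check, and the two-pointer running-sum contiguous search is replaced by one prefix-sum table scanned per window length keeping the last matching start
import Mathlib
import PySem

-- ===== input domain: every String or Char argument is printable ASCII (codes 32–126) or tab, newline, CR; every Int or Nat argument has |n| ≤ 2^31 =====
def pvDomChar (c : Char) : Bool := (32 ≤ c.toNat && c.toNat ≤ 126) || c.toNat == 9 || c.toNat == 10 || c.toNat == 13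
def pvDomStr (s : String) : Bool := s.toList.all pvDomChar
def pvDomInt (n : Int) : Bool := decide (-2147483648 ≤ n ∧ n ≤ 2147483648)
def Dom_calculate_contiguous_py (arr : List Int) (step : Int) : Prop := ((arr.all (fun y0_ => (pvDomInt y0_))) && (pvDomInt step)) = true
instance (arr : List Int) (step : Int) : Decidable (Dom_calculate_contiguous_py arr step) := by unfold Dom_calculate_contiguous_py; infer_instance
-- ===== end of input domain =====

-- B replaces A's combinations pair scan by a seen-set two-sum check and A's
-- two-pointer running-sum contiguous search by one prefix-sum table (objective: faster).

-- ===== PORT A =====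

-- itertools.combinations(lst, 2): the pairs (lst[i], lst[j]) with i < j, in order
def pvCombs2 : List Int → List (Int × Int)
  | [] => []
  | x :: xs => (xs.map fun y => (x, y)) ++ pvCombs2 xs

-- the 'for i in arr[step:]' loop of _calculate, carrying _index
-- (_comb_arr's int(item) and the int(i) below are identities on ints)
def pvCalcLoopA (arr : List Int) (step : Int) : List Int → Int → Int
  | [], _ => 0
  | i :: rest, idx =>
    let comb := PySem.List.slice arr (some (idx - step)) (some idx)
    let isOk := (pvCombs2 comb).foldl (fun ok p => if p.1 + p.2 == i then true else ok) false
    if isOk then pvCalcLoopA arr step rest (idx + 1) else i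

def pvCalculateA (arr : List Int) (step : Int) : Int :=
  pvCalcLoopA arr step (PySem.List.slice arr (some step) none) step

-- the outer 'while i <= n' of _search_contiguous; fuel k+1 means n+1-i iterations
-- remain (i = n-k); the inner 'while index >= r' sets index to r-1 < r, so it runs at
-- most once: it is ported as the single conditional step.  arr[start] / arr[i] are in
-- range on every state the call below reaches (Python would raise otherwise).
def pvSearchLoopA (arr : List Int) (target r : Int) (n : Nat) :
    Nat → Int → Int → Int → List Int → List Int
  | 0, _, _, _, best => best
  | k + 1, start, curr, index, best =>
    let i : Int := (n : Int) - (k : Int)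
    let best' := if curr == target && index == r then PySem.List.slice arr (some (i - r)) (some i) else best
    let s2 := if index ≥ r then (curr - (PySem.List.pyGet? arr start).getD 0, start + 1, r - 1)
              else (curr, start, index)
    let s3 := if i < (n : Int) then (s2.1 + (PySem.List.pyGet? arr i).getD 0, s2.2.2 + 1)
              else (s2.1, s2.2.2)
    pvSearchLoopA arr target r n k s2.2.1 s3.1 s3.2 best'

-- _search_contiguous(arr, target_sum, r); min/max of the (always nonempty) list
def pvSearchContiguousA (arr : List Int) (target r : Int) : Int :=
  let n := arr.length
  let best := pvSearchLoopA arr target r n n 0 ((PySem.List.pyGet? arr 0).getD 0) 1 [0]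
  ((PySem.List.min? best fun x => x).getD 0) + ((PySem.List.max? best fun x => x).getD 0)

-- the 'for i in range(2, 50)' loop of _calculate_contiguous
def pvContigLoopA (arr : List Int) (target : Int) : List Int → Int
  | [] => 0
  | r :: rs =>
    let res := pvSearchContiguousA arr target r
    if res > 0 then res else pvContigLoopA arr target rs

def calculate_contiguous_py (arr : List Int) (step : Int) : Int :=
  let target := pvCalculateA arr step
  let int_arr := arr.map (fun e => e)   -- int(element) is the identity on ints
  pvContigLoopA int_arr target (PySem.List.pyRange 2 50 1)

-- ===== PORT B =====

-- the seen-set two-sum scan (with early break) of Source B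
def pvTwoSumB (v : Int) : List Int → PySem.Set Int → Bool
  | [], _ => false
  | x :: xs, seen =>
    if PySem.Set.contains seen (v - x) then true else pvTwoSumB v xs (PySem.Set.add seen x)

-- Source B's 'for v in nums[step:]' loop finding the first invalid number
def pvFindInvalidB (nums : List Int) (step : Int) : List Int → Int → Int
  | [], _ => 0
  | v :: rest, idx =>
    let window := PySem.List.slice nums (some (idx - step)) (some idx)
    if pvTwoSumB v window PySem.Set.empty then pvFindInvalidB nums step rest (idx + 1) else v

-- prefix = [0]; for x in nums: prefix.append(prefix[-1] + x)
def pvPrefixB (nums : List Int) : List Int :=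
  nums.foldl (fun p x => p ++ [(PySem.List.pyGet? p (-1)).getD 0 + x]) [0]

-- 'for j in range(0, n - r + 1)' keeping the last j whose window sums to target
def pvBestLoopB (pfx : List Int) (target r : Int) : List Int → Option Int → Option Int
  | [], best => best
  | j :: js, best =>
    pvBestLoopB pfx target r js
      (if (PySem.List.pyGet? pfx (j + r)).getD 0 - (PySem.List.pyGet? pfx j).getD 0 == target
       then some j else best)

-- Source B's 'for r in range(2, 50)' loop
def pvContigLoopB (nums pfx : List Int) (target : Int) : List Int → Int
  | [] => 0
  | r :: rs =>
    match pvBestLoopB pfx target r (PySem.List.pyRange 0 ((nums.length : Int) - r + 1) 1) none with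
    | some j =>
      let w := PySem.List.slice nums (some j) (some (j + r))
      let res := ((PySem.List.min? w fun x => x).getD 0) + ((PySem.List.max? w fun x => x).getD 0)
      if res > 0 then res else pvContigLoopB nums pfx target rs
    | none => pvContigLoopB nums pfx target rs

def calculate_contiguous_py_alt (arr : List Int) (step : Int) : Int :=
  let nums := arr.map (fun e => e)   -- int(e) is the identity on ints
  let target := pvFindInvalidB nums step (PySem.List.slice nums (some step) none) step
  pvContigLoopB nums (pvPrefixB nums) target (PySem.List.pyRange 2 50 1)

-- ===== PRECONDITION & SPEC =====
-- Pre_ excludes only the empty list, on which A raises IndexError (arr[0] in _search_contiguous).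
def Pre_calculate_contiguous_py (arr : List Int) (step : Int) : Prop := arr ≠ []
instance (arr : List Int) (step : Int) : Decidable (Pre_calculate_contiguous_py arr step) := by
  unfold Pre_calculate_contiguous_py; infer_instance

def pvWitness_calculate_contiguous_py : List Int × Int := ([35, 20, 15, 25, 47, 40], 2)

def Spec_calculate_contiguous_py (arr : List Int) (step : Int) (out : Int) : Prop := out = calculate_contiguous_py_alt arr step
instance (arr : List Int) (step : Int) (out : Int) : Decidable (Spec_calculate_contiguous_py arr step out) := by unfold Spec_calculate_contiguous_py; infer_instance

-- ===== CLAIM (what is proved, stated in full; the proofs are below) =====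
def Claim_equal_calculate_contiguous_py : Prop := ∀ (arr : List Int) (step : Int), Dom_calculate_contiguous_py arr step → Pre_calculate_contiguous_py arr step → Spec_calculate_contiguous_py arr step (calculate_contiguous_py arr step)

-- ===== LEMMAS AND PROOFS =====

-- the sum of the window arr[a:b] (natural indices)
def pvWinSum (arr : List Int) (a b : Nat) : Int := ((arr.take b).drop a).sum

-- what one end position e contributes to A's best list
def pvUpd (arr : List Int) (t : Int) (rn : Nat) (e : Nat) (best : List Int) : List Int :=
  if rn ≤ e ∧ pvWinSum arr (e - rn) e = t then (arr.drop (e - rn)).take rn else best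

-- B's fold over window starts, on the Nat side
def pvFoldBN (arr : List Int) (t : Int) (rn : Nat) (L : List Nat) (o : Option Nat) : Option Nat :=
  L.foldl (fun o k => if pvWinSum arr k (k + rn) = t then some k else o) o

-- the best list A holds, read off B's fold result
def pvInterp (arr : List Int) (rn : Nat) : Option Nat → List Int
  | some j => (arr.drop j).take rn
  | none => [0]

lemma pvWinSum_add (arr : List Int) (a b : Nat) (hab : a ≤ b) (hb : b < arr.length) :
    pvWinSum arr a (b + 1) = pvWinSum arr a b + arr.getD b 0 := by
  unfold pvWinSum
  rw [List.take_add_one, List.drop_append_of_le_length (by simp; omega)]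
  rw [List.sum_append]
  have : arr[b]? = some arr[b] := List.getElem?_eq_getElem hb
  simp [this]


lemma pvWinSum_sub (arr : List Int) (a b : Nat) (hab : a < b) (hb : b ≤ arr.length) :
    pvWinSum arr a b = arr.getD a 0 + pvWinSum arr (a + 1) b := by
  unfold pvWinSum
  have ha : a < (arr.take b).length := by simp; omega
  rw [List.drop_eq_getElem_cons ha, List.sum_cons, List.getElem_take]
  rw [List.getD_eq_getElem arr 0 (by omega)]


lemma pvWinSum_eq_sub (arr : List Int) (a b : Nat) (hab : a ≤ b) :
    pvWinSum arr a b = (arr.take b).sum - (arr.take a).sum := by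
  unfold pvWinSum
  have h1 : arr.take a = (arr.take b).take a := by rw [List.take_take, min_eq_left hab]
  calc ((arr.take b).drop a).sum
      = ((arr.take b).take a).sum + ((arr.take b).drop a).sum - ((arr.take b).take a).sum := by ring
    _ = (arr.take b).sum - (arr.take a).sum := by
        rw [← List.sum_append, List.take_append_drop, ← h1]


lemma pvGet_nat (arr : List Int) (m : Nat) :
    (PySem.List.pyGet? arr ((m : Nat) : Int)).getD 0 = arr.getD m 0 := by
  rw [PySem.List.pyGet?_natCast, List.getD_eq_getElem?_getD]

-- one step of A's loop, at the invariant state for end position i = n - k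


lemma pvPrefixB_aux (l : List Int) : ∀ (p : List Int) (x0 : Int),
    l.foldl (fun p x => p ++ [(PySem.List.pyGet? p (-1)).getD 0 + x]) (p ++ [x0])
      = p ++ l.scanl (· + ·) x0 := by
  induction l with
  | nil => intro p x0; simp
  | cons y ys ih =>
    intro p x0
    rw [List.foldl_cons, PySem.List.pyGet?_neg_one_append_singleton]
    simpa [List.append_assoc] using ih (p ++ [x0]) (x0 + y)


lemma pvPrefixB_eq (nums : List Int) : pvPrefixB nums = nums.scanl (· + ·) 0 := by
  simpa using pvPrefixB_aux nums [] 0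


lemma pvScanl_get (nums : List Int) : ∀ (k : Nat) (c : Int), k ≤ nums.length →
    (nums.scanl (· + ·) c)[k]? = some (c + (nums.take k).sum) := by
  induction nums with
  | nil =>
    intro k c hk
    have : k = 0 := by simpa using hk
    subst this; simp
  | cons x xs ih =>
    intro k c hk
    match k with
    | 0 => simp
    | k + 1 =>
      rw [List.scanl_cons]
      simpa [add_assoc] using ih k (c + x) (by simpa using hk)


lemma pvPrefix_get (nums : List Int) (k : Nat) (hk : k ≤ nums.length) :
    (PySem.List.pyGet? (pvPrefixB nums) (k : Int)).getD 0 = ((nums.take k).sum) := by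
  rw [pvPrefixB_eq, PySem.List.pyGet?_natCast, pvScanl_get nums k 0 hk]
  simp


lemma pvTwoSumB_eq (v : Int) (w : List Int) : ∀ s : PySem.Set Int,
    pvTwoSumB v w s
      = ((w.any fun x => PySem.Set.contains s (v - x)) ||
         (pvCombs2 w).any fun p => p.1 + p.2 == v) := by
  induction w with
  | nil => intro s; simp [pvTwoSumB, pvCombs2]
  | cons x xs ih =>
    intro s
    rw [pvTwoSumB, Bool.eq_iff_iff]
    by_cases h : (v - x) ∈ s
    · simp [h, pvCombs2]
    · rw [if_neg (by simpa using h), ih]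
      simp only [List.any_eq_true, List.any_cons, List.any_append, List.any_map, Bool.or_eq_true,
        PySem.Set.contains_iff, PySem.Set.mem_add, pvCombs2, Function.comp, beq_iff_eq]
      constructor
      · rintro (⟨y, hy, hmem | heq⟩ | hcmb)
        · exact Or.inl (Or.inr ⟨y, hy, hmem⟩)
        · exact Or.inr (Or.inl ⟨y, hy, by omega⟩)
        · exact Or.inr (Or.inr hcmb)
      · rintro ((hx | ⟨y, hy, hmem⟩) | (⟨y, hy, heq⟩ | hcmb))
        · exact absurd hx h
        · exact Or.inl ⟨y, hy, Or.inl hmem⟩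
        · exact Or.inl ⟨y, hy, Or.inr (by omega)⟩
        · exact Or.inr hcmb


lemma pvCheck_eq (v : Int) (w : List Int) :
    ((pvCombs2 w).foldl (fun ok p => if p.1 + p.2 == v then true else ok) false)
      = pvTwoSumB v w PySem.Set.empty := by
  rw [PySem.List.foldl_if_true_eq, pvTwoSumB_eq]
  simp [PySem.Set.empty]


lemma pvFindLoop_eq (arr : List Int) (step : Int) : ∀ (lst : List Int) (idx : Int),
    pvCalcLoopA arr step lst idx = pvFindInvalidB arr step lst idx := by
  intro lst
  induction lst with
  | nil => intro idx; rfl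
  | cons v rest ih =>
    intro idx
    rw [pvCalcLoopA, pvFindInvalidB]
    simp only [pvCheck_eq, ih]


lemma pvCouple (arr : List Int) (t : Int) (rn : Nat) :
    ∀ (L : List Nat) (b : List Int) (o : Option Nat), b = pvInterp arr rn o →
      L.foldl (fun b k => pvUpd arr t rn (rn + k) b) b
        = pvInterp arr rn (pvFoldBN arr t rn L o) := by
  intro L
  induction L with
  | nil => intro b o hb; simpa [pvFoldBN] using hb
  | cons k ks ih =>
    intro b o hb
    rw [List.foldl_cons]
    show ks.foldl _ (pvUpd arr t rn (rn + k) b) = pvInterp arr rn (pvFoldBN arr t rn (k :: ks) o)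
    have : pvFoldBN arr t rn (k :: ks) o
        = pvFoldBN arr t rn ks (if pvWinSum arr k (k + rn) = t then some k else o) := rfl
    rw [this]
    apply ih
    unfold pvUpd
    by_cases hc : pvWinSum arr k (k + rn) = t
    · rw [if_pos (by constructor; omega; simpa [Nat.add_sub_cancel_left, Nat.add_comm] using hc)]
      simp [hc, pvInterp]
    · rw [if_neg (by rintro ⟨-, hx⟩; apply hc; simpa [Nat.add_sub_cancel_left, Nat.add_comm] using hx)]
      simp [hc, hb]


lemma pvBestLoop_fold (pfx : List Int) (t r : Int) : ∀ (L : List Int) (best : Option Int),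
    pvBestLoopB pfx t r L best
      = L.foldl (fun b j => if (PySem.List.pyGet? pfx (j + r)).getD 0 - (PySem.List.pyGet? pfx j).getD 0 = t
                            then some j else b) best := by
  intro L
  induction L with
  | nil => intro best; rfl
  | cons j js ih =>
    intro best
    rw [pvBestLoopB, List.foldl_cons, ih]
    simp [beq_iff_eq]


lemma pvNatify (C : Nat → Prop) [DecidablePred C] :
    ∀ (L : List Nat) (o : Option Nat),
      L.foldl (fun b k => if C k then some ((k : Nat) : Int) else b) (o.map (fun k => ((k : Nat) : Int)))
        = (L.foldl (fun b k => if C k then some k else b) o).map (fun k => ((k : Nat) : Int)) := by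
  intro L
  induction L with
  | nil => intro o; rfl
  | cons k ks ih =>
    intro o
    rw [List.foldl_cons, List.foldl_cons]
    by_cases h : C k
    · rw [if_pos h, if_pos h, ← ih (some k)]; rfl
    · rw [if_neg h, if_neg h, ih]


lemma pvBestLoopB_eq (arr : List Int) (t r : Int) (hr : 2 ≤ r) :
    pvBestLoopB (pvPrefixB arr) t r (PySem.List.pyRange 0 ((arr.length : Int) - r + 1) 1) none
      = (pvFoldBN arr t r.toNat (List.range (arr.length + 1 - r.toNat)) none).map (fun k => (k : Int)) := by
  rw [pvBestLoop_fold, PySem.List.pyRange_one]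
  have hm : (((arr.length : Int) - r + 1) - 0).toNat = arr.length + 1 - r.toNat := by omega
  rw [hm, List.foldl_map]
  have hstep : ∀ (b : Option Int) (k : Nat), k ∈ List.range (arr.length + 1 - r.toNat) →
      (if (PySem.List.pyGet? (pvPrefixB arr) ((0 + (k:Int)) + r)).getD 0
            - (PySem.List.pyGet? (pvPrefixB arr) (0 + (k:Int))).getD 0 = t
       then some (0 + (k:Int)) else b)
      = (if pvWinSum arr k (k + r.toNat) = t then some ((k:Nat) : Int) else b) := by
    intro b k hk
    rw [List.mem_range] at hk
    have hkr : k + r.toNat ≤ arr.length := by omega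
    have h1 : (0 + (k:Int)) + r = ((k + r.toNat : Nat) : Int) := by push_cast; omega
    have h2 : (0 + (k:Int)) = ((k : Nat) : Int) := by omega
    rw [h1, h2, pvPrefix_get arr (k + r.toNat) hkr, pvPrefix_get arr k (by omega),
        pvWinSum_eq_sub arr k (k + r.toNat) (by omega)]
  have hcong := PySem.List.foldl_congr_mem
      (l := List.range (arr.length + 1 - r.toNat)) (init := (none : Option Int))
      (f := fun b (k : Nat) =>
        if (PySem.List.pyGet? (pvPrefixB arr) ((0 + (k:Int)) + r)).getD 0
              - (PySem.List.pyGet? (pvPrefixB arr) (0 + (k:Int))).getD 0 = t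
        then some (0 + (k:Int)) else b)
      (g := fun b (k : Nat) => if pvWinSum arr k (k + r.toNat) = t then some ((k:Nat):Int) else b)
      (fun acc x hx => hstep acc x hx)
  rw [hcong]
  have := pvNatify (fun k => pvWinSum arr k (k + r.toNat) = t)
      (List.range (arr.length + 1 - r.toNat)) none
  simpa [pvFoldBN, Option.map_eq_bind] using this


lemma pvLoopA_step (arr : List Int) (t r : Int) (hr : 2 ≤ r) (k : Nat) (hk : k < arr.length)
    (best : List Int) :
    pvSearchLoopA arr t r arr.length (k + 1)
      (((arr.length - k) - min (arr.length - k) r.toNat : Nat) : Int)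
      (pvWinSum arr ((arr.length - k) - min (arr.length - k) r.toNat) (arr.length - k))
      ((min (arr.length - k) r.toNat : Nat) : Int)
      best
    = pvSearchLoopA arr t r arr.length k
      (((arr.length - k + 1) - min (arr.length - k + 1) r.toNat : Nat) : Int)
      (pvWinSum arr ((arr.length - k + 1) - min (arr.length - k + 1) r.toNat) (arr.length - k + 1))
      ((min (arr.length - k + 1) r.toNat : Nat) : Int)
      (pvUpd arr t r.toNat (arr.length - k) best) := by
  have hrcast : ((r.toNat : Nat) : Int) = r := Int.toNat_of_nonneg (by omega)
  set n := arr.length with hn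
  set i := n - k with hi
  set rn := r.toNat with hrn
  have hi1 : 1 ≤ i := by omega
  have hin : i ≤ n := by omega
  rw [pvSearchLoopA]
  have hiI : (n : Int) - (k : Int) = ((i : Nat) : Int) := by omega
  -- the best update
  have hbest : (if (pvWinSum arr (i - min i rn) i == t && ((min i rn : Nat) : Int) == r)
        then PySem.List.slice arr (some (((n : Int) - (k : Int)) - r)) (some ((n : Int) - (k : Int))) else best)
      = pvUpd arr t rn i best := by
    by_cases hle : rn ≤ i
    · have hmin : min i rn = rn := by omega
      have hslice : PySem.List.slice arr (some (((n : Int) - (k : Int)) - r)) (some ((n : Int) - (k : Int)))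
          = (arr.drop (i - rn)).take rn := by
        have h1 : ((n : Int) - (k : Int)) - r = ((i - rn : Nat) : Int) := by omega
        rw [h1, hiI, PySem.List.slice_natCast]
        congr 1; omega
      unfold pvUpd
      by_cases hc : pvWinSum arr (i - rn) i = t
      · rw [if_pos (by simp only [Bool.and_eq_true, beq_iff_eq]
                       exact ⟨by rw [hmin]; exact hc, by rw [hmin, hrcast]⟩),
            if_pos ⟨hle, hc⟩, hslice]
      · rw [if_neg (by simp only [Bool.and_eq_true, beq_iff_eq]
                       rintro ⟨h1, -⟩; rw [hmin] at h1; exact hc h1),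
            if_neg (by rintro ⟨-, h⟩; exact hc h)]
    · have hmin : min i rn = i := by omega
      rw [if_neg (by simp only [Bool.and_eq_true, beq_iff_eq]
                     rintro ⟨-, h2⟩; rw [hmin] at h2; omega),
          pvUpd, if_neg (by rintro ⟨h, -⟩; omega)]
  rw [hbest]
  -- the state update
  by_cases hle : rn ≤ i
  · have hmin : min i rn = rn := by omega
    have hminor : min (i + 1) rn = rn := by omega
    have hge : (((min i rn : Nat) : Int) ≥ r) := by rw [hmin, hrcast]
    rw [if_pos hge]
    by_cases hlt : ((n : Int) - (k : Int)) < (n : Int)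
    · have hiltn : i < n := by omega
      rw [if_pos hlt]
      simp only [hmin, hiI, pvGet_nat]
      have hcurr : pvWinSum arr (i - rn) i - arr.getD (i - rn) 0 + arr.getD i 0
          = pvWinSum arr (i + 1 - min (i + 1) rn) (i + 1) := by
        rw [hminor, pvWinSum_sub arr (i - rn) i (by omega) hin,
            show i + 1 - rn = (i - rn) + 1 from by omega,
            pvWinSum_add arr (i - rn + 1) i (by omega) hiltn]
        ring
      rw [hcurr,
          show ((i - rn : Nat) : Int) + 1 = ((i + 1 - min (i + 1) rn : Nat) : Int) from by
            rw [hminor]; omega,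
          show r - 1 + 1 = ((min (i + 1) rn : Nat) : Int) from by rw [hminor, hrcast]; ring]
    · have hk0 : k = 0 := by omega
      rw [if_neg hlt]
      subst hk0
      rw [pvSearchLoopA, pvSearchLoopA]
  · have hmin : min i rn = i := by omega
    have hminor : min (i + 1) rn = i + 1 := by omega
    have hge : ¬ (((min i rn : Nat) : Int) ≥ r) := by rw [hmin]; intro h; omega
    rw [if_neg hge]
    by_cases hlt : ((n : Int) - (k : Int)) < (n : Int)
    · have hiltn : i < n := by omega
      rw [if_pos hlt]
      simp only [hmin, hiI, pvGet_nat, Nat.sub_self]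
      have hcurr : pvWinSum arr 0 i + arr.getD i 0
          = pvWinSum arr (i + 1 - min (i + 1) rn) (i + 1) := by
        rw [hminor, Nat.sub_self, pvWinSum_add arr 0 i (by omega) hiltn]
      rw [hcurr,
          show ((0 : Nat) : Int) = ((i + 1 - min (i + 1) rn : Nat) : Int) from by
            rw [hminor, Nat.sub_self],
          show ((i : Nat) : Int) + 1 = ((min (i + 1) rn : Nat) : Int) from by
            rw [hminor]; push_cast; ring]
    · have hk0 : k = 0 := by omega
      rw [if_neg hlt]
      subst hk0
      rw [pvSearchLoopA, pvSearchLoopA]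


lemma pvLoopA_eq (arr : List Int) (t r : Int) (hr : 2 ≤ r) :
    ∀ (k : Nat), k < arr.length → ∀ best : List Int,
      pvSearchLoopA arr t r arr.length (k + 1)
        (((arr.length - k) - min (arr.length - k) r.toNat : Nat) : Int)
        (pvWinSum arr ((arr.length - k) - min (arr.length - k) r.toNat) (arr.length - k))
        ((min (arr.length - k) r.toNat : Nat) : Int)
        best
      = (List.range' (arr.length - k) (k + 1)).foldl (fun b e => pvUpd arr t r.toNat e b) best := by
  intro k
  induction k with
  | zero =>
    intro hk best
    rw [pvLoopA_step arr t r hr 0 hk best, pvSearchLoopA]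
    simp [List.range']
  | succ k' ih =>
    intro hk best
    rw [pvLoopA_step arr t r hr (k' + 1) hk best,
        show arr.length - (k' + 1) + 1 = arr.length - k' from by omega,
        ih (by omega) (pvUpd arr t r.toNat (arr.length - (k' + 1)) best)]
    conv_rhs => rw [List.range'_succ, List.foldl_cons,
        show arr.length - (k' + 1) + 1 = arr.length - k' from by omega]


lemma pvFoldTotal (arr : List Int) (t r : Int) (hr : 2 ≤ r) :
    (List.range' 1 arr.length).foldl (fun b e => pvUpd arr t r.toNat e b) [0]
      = pvInterp arr r.toNat (pvFoldBN arr t r.toNat (List.range (arr.length + 1 - r.toNat)) none) := by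
  set n := arr.length with hn
  set rn := r.toNat with hrn
  have hrn2 : 2 ≤ rn := by omega
  by_cases hcase : rn ≤ n
  · have hsplit : List.range' 1 n = List.range' 1 (rn - 1) ++ List.range' rn (n - rn + 1) := by
      have h := List.range'_append_1 (s := 1) (m := rn - 1) (n := n - rn + 1)
      rw [show 1 + (rn - 1) = rn from by omega, show rn - 1 + (n - rn + 1) = n from by omega] at h
      exact h.symm
    rw [hsplit, List.foldl_append]
    have hfirst : (List.range' 1 (rn - 1)).foldl (fun b e => pvUpd arr t rn e b) [0] = [0] := by
      have hco := PySem.List.foldl_congr_mem (l := List.range' 1 (rn - 1)) (init := ([0] : List Int))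
          (f := fun b e => pvUpd arr t rn e b) (g := fun b _ => b)
          (by intro acc e he
              rw [List.mem_range'_1] at he
              show pvUpd arr t rn e acc = acc
              unfold pvUpd
              rw [if_neg (by rintro ⟨h1, -⟩; omega)])
      rw [hco, PySem.List.foldl_ignore]
    rw [hfirst, List.range'_eq_map_range, List.foldl_map,
        pvCouple arr t rn (List.range (n - rn + 1)) [0] none rfl,
        show n - rn + 1 = n + 1 - rn from by omega]
  · have hall : (List.range' 1 n).foldl (fun b e => pvUpd arr t rn e b) [0] = [0] := by
      have hco := PySem.List.foldl_congr_mem (l := List.range' 1 n) (init := ([0] : List Int))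
          (f := fun b e => pvUpd arr t rn e b) (g := fun b _ => b)
          (by intro acc e he
              rw [List.mem_range'_1] at he
              show pvUpd arr t rn e acc = acc
              unfold pvUpd
              rw [if_neg (by rintro ⟨h1, -⟩; omega)])
      rw [hco, PySem.List.foldl_ignore]
    rw [hall, show n + 1 - rn = 0 from by omega]
    rfl


lemma pvSearchA_char (arr : List Int) (t r : Int) (hr : 2 ≤ r) (hne : arr ≠ []) :
    pvSearchContiguousA arr t r
      = ((PySem.List.min? (pvInterp arr r.toNat (pvFoldBN arr t r.toNat (List.range (arr.length + 1 - r.toNat)) none)) fun x => x).getD 0)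
        + ((PySem.List.max? (pvInterp arr r.toNat (pvFoldBN arr t r.toNat (List.range (arr.length + 1 - r.toNat)) none)) fun x => x).getD 0) := by
  have hn1 : 1 ≤ arr.length := List.length_pos_iff.mpr hne
  have hstate : pvSearchLoopA arr t r arr.length arr.length 0 ((PySem.List.pyGet? arr 0).getD 0) 1 [0]
      = (List.range' 1 arr.length).foldl (fun b e => pvUpd arr t r.toNat e b) [0] := by
    have h0 : (PySem.List.pyGet? arr (0 : Int)).getD 0 = pvWinSum arr 0 1 := by
      match arr, hne with
      | x :: xs, _ => simp [pvWinSum]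
    have hinst := pvLoopA_eq arr t r hr (arr.length - 1) (by omega) [0]
    rw [show arr.length - (arr.length - 1) = 1 from by omega] at hinst
    rw [show min 1 r.toNat = 1 from by omega] at hinst
    simpa [h0, show arr.length - 1 + 1 = arr.length from by omega] using hinst
  show ((PySem.List.min? (pvSearchLoopA arr t r arr.length arr.length 0 ((PySem.List.pyGet? arr 0).getD 0) 1 [0]) fun x => x).getD 0)
      + ((PySem.List.max? (pvSearchLoopA arr t r arr.length arr.length 0 ((PySem.List.pyGet? arr 0).getD 0) 1 [0]) fun x => x).getD 0) = _
  rw [hstate, pvFoldTotal arr t r hr]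


-- the two range(2,50) loops agree
lemma pvContig_eq (arr : List Int) (t : Int) (hne : arr ≠ []) :
    ∀ rs : List Int, (∀ r ∈ rs, 2 ≤ r) →
      pvContigLoopA arr t rs = pvContigLoopB arr (pvPrefixB arr) t rs := by
  intro rs
  induction rs with
  | nil => intro _; rfl
  | cons r rs ih =>
    intro hall
    have hr : 2 ≤ r := hall r (by simp)
    have htail : ∀ r' ∈ rs, 2 ≤ r' := fun r' h => hall r' (by simp [h])
    rw [pvContigLoopA, pvContigLoopB, pvBestLoopB_eq arr t r hr, pvSearchA_char arr t r hr hne]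
    rcases hbo : pvFoldBN arr t r.toNat (List.range (arr.length + 1 - r.toNat)) none with _ | j
    · show _ = (match (Option.map (fun k => ((k : Nat) : Int)) (none : Option Nat)) with
        | some j =>
          let w := PySem.List.slice arr (some j) (some (j + r))
          let res := ((PySem.List.min? w fun x => x).getD 0) + ((PySem.List.max? w fun x => x).getD 0)
          if res > 0 then res else pvContigLoopB arr (pvPrefixB arr) t rs
        | none => pvContigLoopB arr (pvPrefixB arr) t rs)
      simp only [Option.map_none, pvInterp]
      rw [show ((PySem.List.min? [(0 : Int)] fun x => x).getD 0) = 0 from by decide,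
          show ((PySem.List.max? [(0 : Int)] fun x => x).getD 0) = 0 from by decide]
      norm_num
      exact ih htail
    · show _ = (match (Option.map (fun k => ((k : Nat) : Int)) (some j)) with
        | some j =>
          let w := PySem.List.slice arr (some j) (some (j + r))
          let res := ((PySem.List.min? w fun x => x).getD 0) + ((PySem.List.max? w fun x => x).getD 0)
          if res > 0 then res else pvContigLoopB arr (pvPrefixB arr) t rs
        | none => pvContigLoopB arr (pvPrefixB arr) t rs)
      simp only [Option.map_some, pvInterp]
      have hw : PySem.List.slice arr (some ((j : Nat) : Int)) (some (((j : Nat) : Int) + r))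
          = (arr.drop j).take r.toNat := by
        rw [show ((j : Nat) : Int) + r = ((j + r.toNat : Nat) : Int) from by push_cast; omega,
            PySem.List.slice_natCast]
        congr 1; omega
      rw [hw]
      split
      · rfl
      · exact ih htail

-- ===== VERDICT (by name: the statement is the Claim_ definition above) =====
theorem calculate_contiguous_py_spec : Claim_equal_calculate_contiguous_py := by
  unfold Claim_equal_calculate_contiguous_py
  intro arr step _hdom hpre
  unfold Spec_calculate_contiguous_py
  unfold calculate_contiguous_py calculate_contiguous_py_alt pvCalculateA
  simp only [List.map_id_fun', id]
  rw [pvFindLoop_eq]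
  exact pvContig_eq arr _ hpre _
    (by intro r hrm; rw [PySem.List.mem_pyRange_one] at hrm; omega)
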